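-- pv_equiv track=rewrite | github.com/GustavoSRodriguess/taverna-do-mestre | ai-service/create_npc.py | calculate_hp
-- ===== SOURCE A (Python) =====
-- def calculate_hp(class_name_index, level, constitution_modifier):
--     safe_class_idx = class_name_index.lower() if class_name_index else "fighter"
--     hit_dice_map = {
--         "barbarian": 12, "fighter": 10, "paladin": 10, "ranger": 10,
--         "bard": 8, "cleric": 8, "druid": 8, "monk": 8, "rogue": 8, "warlock": 8,
--         "sorcerer": 6, "wizard": 6 }
--     hit_die = hit_dice_map.get(safe_class_idx, 8)
--     hp = hit_die + constitution_modifier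
--     if level > 1:
--         for _ in range(1, level):
--             hp += max(1, (hit_die // 2) + 1 + constitution_modifier)
--     return max(1, int(hp))
-- ===== SOURCE B (Python) =====
-- def calculate_hp(class_name_index, level, constitution_modifier):
--     name = class_name_index.lower() if class_name_index else "fighter"
--     if name == "barbarian":
--         die = 12
--     elif name in ("fighter", "paladin", "ranger"):
--         die = 10
--     elif name in ("sorcerer", "wizard"):
--         die = 6
--     else:
--         die = 8
--     per_level = max(1, die // 2 + 1 + constitution_modifier)
--     return max(1, die + constitution_modifier + max(0, level - 1) * per_level)
-- ===== Notes on version B (the rewrite author's own statement) =====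
-- stated objective: faster
-- what changed: Replaces the dict lookup with a grouped if/elif chain over die sizes and the per-level loop with a single closed-form expression max(0, level-1) * increment, eliminating both the dict and the level branch.
import Mathlib
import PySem

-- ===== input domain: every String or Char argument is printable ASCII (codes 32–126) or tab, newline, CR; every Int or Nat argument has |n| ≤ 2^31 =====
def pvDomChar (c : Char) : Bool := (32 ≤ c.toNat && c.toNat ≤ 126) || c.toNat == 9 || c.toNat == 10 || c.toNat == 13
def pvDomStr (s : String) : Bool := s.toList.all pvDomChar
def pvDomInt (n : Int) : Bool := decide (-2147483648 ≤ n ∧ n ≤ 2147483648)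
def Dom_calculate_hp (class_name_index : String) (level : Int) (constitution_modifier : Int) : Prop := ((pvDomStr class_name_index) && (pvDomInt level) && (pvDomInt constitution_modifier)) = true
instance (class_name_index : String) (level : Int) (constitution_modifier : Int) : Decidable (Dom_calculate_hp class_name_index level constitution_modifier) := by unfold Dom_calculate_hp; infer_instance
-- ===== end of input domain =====

-- B replaces A's dict lookup by an if/elif chain grouped by die size and A's per-level loop by the closed form max(0, level-1) * increment (O(level) → O(1)).

-- ===== PORT A =====
def hitDiceMap : PySem.Dict String Int := PySem.Dict.ofList
  [("barbarian", 12), ("fighter", 10), ("paladin", 10), ("ranger", 10),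
   ("bard", 8), ("cleric", 8), ("druid", 8), ("monk", 8), ("rogue", 8), ("warlock", 8),
   ("sorcerer", 6), ("wizard", 6)]

def calculate_hp (class_name_index : String) (level : Int) (constitution_modifier : Int) : Int :=
  let safe_class_idx := if class_name_index ≠ "" then PySem.Str.lower class_name_index else "fighter"
  let hit_die := hitDiceMap.getD safe_class_idx 8
  let hp := hit_die + constitution_modifier
  let hp := if level > 1 then
      (PySem.List.pyRange 1 level 1).foldl
        (fun h _ => h + max 1 (PySem.Int.floordiv hit_die 2 + 1 + constitution_modifier)) hp
    else hp
  max 1 hp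

-- ===== PORT B =====
def calculate_hp_alt (class_name_index : String) (level : Int) (constitution_modifier : Int) : Int :=
  let name := if class_name_index ≠ "" then PySem.Str.lower class_name_index else "fighter"
  let die : Int :=
    if name = "barbarian" then 12
    else if name = "fighter" ∨ name = "paladin" ∨ name = "ranger" then 10
    else if name = "sorcerer" ∨ name = "wizard" then 6
    else 8
  let per_level := max 1 (PySem.Int.floordiv die 2 + 1 + constitution_modifier)
  max 1 (die + constitution_modifier + max 0 (level - 1) * per_level)

-- ===== PRECONDITION & SPEC =====
def Spec_calculate_hp (class_name_index : String) (level : Int) (constitution_modifier : Int) (out : Int) : Prop := out = calculate_hp_alt class_name_index level constitution_modifier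
instance (class_name_index : String) (level : Int) (constitution_modifier : Int) (out : Int) : Decidable (Spec_calculate_hp class_name_index level constitution_modifier out) := by unfold Spec_calculate_hp; infer_instance

-- ===== CLAIM (what is proved, stated in full; the proofs are below) =====
def Claim_equal_calculate_hp : Prop := ∀ (class_name_index : String) (level : Int) (constitution_modifier : Int), Dom_calculate_hp class_name_index level constitution_modifier → Spec_calculate_hp class_name_index level constitution_modifier (calculate_hp class_name_index level constitution_modifier)

-- ===== LEMMAS AND PROOFS =====
theorem foldl_add_const (l : List Int) (c hp : Int) :
    l.foldl (fun h _ => h + c) hp = hp + l.length * c := by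
  induction l generalizing hp with
  | nil => simp
  | cons x xs ih => simp [List.foldl, ih]; ring

-- A's dict lookup agrees with B's grouped branch chain on every key.
theorem dict_eq_chain (name : String) :
    hitDiceMap.getD name 8 =
      (if name = "barbarian" then 12
       else if name = "fighter" ∨ name = "paladin" ∨ name = "ranger" then 10
       else if name = "sorcerer" ∨ name = "wizard" then 6
       else (8 : Int)) := by
  have hitems : hitDiceMap.items =
      [("barbarian", 12), ("fighter", 10), ("paladin", 10), ("ranger", 10),
       ("bard", 8), ("cleric", 8), ("druid", 8), ("monk", 8), ("rogue", 8), ("warlock", 8),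
       ("sorcerer", 6), ("wizard", 6)] := by decide
  simp only [PySem.Dict.getD, PySem.Dict.get?, hitems, List.find?]
  split_ifs with h1 h2 h3
  · subst h1; decide
  · rcases h2 with h | h | h <;> subst h <;> decide
  · rcases h3 with h | h <;> subst h <;> decide
  by_cases hbard : name = "bard"
  · subst hbard; decide
  by_cases hcleric : name = "cleric"
  · subst hcleric; decide
  by_cases hdruid : name = "druid"
  · subst hdruid; decide
  by_cases hmonk : name = "monk"
  · subst hmonk; decide
  by_cases hrogue : name = "rogue"
  · subst hrogue; decide
  by_cases hwarlock : name = "warlock"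
  · subst hwarlock; decide
  push Not at h2 h3
  simp only [beq_eq_false_iff_ne.mpr (fun e => h1 e.symm),
    beq_eq_false_iff_ne.mpr (fun e => h2.1 e.symm),
    beq_eq_false_iff_ne.mpr (fun e => h2.2.1 e.symm),
    beq_eq_false_iff_ne.mpr (fun e => h2.2.2 e.symm),
    beq_eq_false_iff_ne.mpr (fun e => h3.1 e.symm),
    beq_eq_false_iff_ne.mpr (fun e => h3.2 e.symm),
    beq_eq_false_iff_ne.mpr (fun e => hbard e.symm),
    beq_eq_false_iff_ne.mpr (fun e => hcleric e.symm),
    beq_eq_false_iff_ne.mpr (fun e => hdruid e.symm),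
    beq_eq_false_iff_ne.mpr (fun e => hmonk e.symm),
    beq_eq_false_iff_ne.mpr (fun e => hrogue e.symm),
    beq_eq_false_iff_ne.mpr (fun e => hwarlock e.symm)]
  rfl

-- ===== VERDICT (by name: the statement is the Claim_ definition above) =====
theorem calculate_hp_spec : Claim_equal_calculate_hp := by
  intro s level con _
  unfold Spec_calculate_hp calculate_hp calculate_hp_alt
  simp only [dict_eq_chain]
  by_cases h : level > 1
  · simp only [h, if_true, foldl_add_const, PySem.List.length_pyRange_one]
    have h1 : ((level - 1).toNat : Int) = level - 1 := by omega
    have h2 : max 0 (level - 1) = level - 1 := by omega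
    rw [h1, h2]
  · have h2 : max 0 (level - 1) = 0 := by omega
    simp [h, h2]
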